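-- pv_equiv track=rewrite | github.com/lkkim-skku/NIPlab-ShelterAnimalOutcomes | simulation/Shelter Animal Outcomes/control.py | targetdata
-- ===== SOURCE A (Python) =====
-- def targetdata(dataset: list, attribute=''):
--     """
--
--     :param dataset: header가 포함된 dataset
--     :param attribute: target으로 분류할 attribute
--     :return:
--     """
--     headers = dataset.pop(0)
--     attridx = 0
--     if isinstance(headers, list):
--         attridx = headers.index(attribute)
--
--     target, trdata = [], []
--     for i, col in enumerate(zip(*dataset)):
--         if i == attridx:
--             target = col
--         else:
--             trdata.append(col)
--
--     data = tuple(zip(*trdata))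
--
--     return target, data
-- ===== SOURCE B (Python) =====
-- def targetdata(dataset: list, attribute=''):
--     """Split a table into the target column and the remaining data, row by row.
--
--     Pops the header row off `dataset` in place.
--     """
--     headers = dataset.pop(0)
--     attridx = headers.index(attribute)
--     target = tuple(row[attridx] for row in dataset)
--     data = tuple(tuple(row[:attridx] + row[attridx + 1:]) for row in dataset)
--     return target, data
-- ===== Notes on version B (the rewrite author's own statement) =====
-- stated objective: simpler
-- what changed: B drops both zip(*...) transposes and the enumerate/branch loop over columns and builds target and data in one row-wise pass with slicing; Pre_ excludes inputs where A raises (empty dataset, attribute missing from the header) and ragged tables (a data row of a different length than the header), where A's zip truncation silently drops cells.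
-- intended difference: On well-formed single-column tables with at least one data row, A's double transpose collapses the remaining data to the empty tuple, losing the row count, while B returns one empty row per record, which preserves the table shape. — e.g. on targetdata([["y"], ["a"], ["b"]], "y"): A returns (["a", "b"], []), B returns (["a", "b"], [[], []])
-- outside the precondition, e.g. on targetdata([], ''): A raises IndexError, B raises IndexError; on targetdata([['10', '', ''], [], ['']], ''): A returns ((), ()), B raises IndexError
import Mathlib
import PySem

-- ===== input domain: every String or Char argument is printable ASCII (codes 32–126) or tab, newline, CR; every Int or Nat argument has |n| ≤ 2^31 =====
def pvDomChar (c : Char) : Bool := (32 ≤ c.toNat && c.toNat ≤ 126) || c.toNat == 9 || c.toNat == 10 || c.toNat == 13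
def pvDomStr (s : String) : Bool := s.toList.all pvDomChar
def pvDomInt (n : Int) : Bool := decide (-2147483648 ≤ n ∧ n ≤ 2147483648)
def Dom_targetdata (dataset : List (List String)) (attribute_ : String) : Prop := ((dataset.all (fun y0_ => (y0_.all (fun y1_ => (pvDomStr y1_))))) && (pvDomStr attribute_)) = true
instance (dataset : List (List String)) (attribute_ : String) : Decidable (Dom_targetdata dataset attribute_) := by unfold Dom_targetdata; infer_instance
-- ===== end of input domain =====

-- B replaces A's two zip(*…) transposes and the enumerate/branch loop by one row-wise pass with
-- slicing; like A it pops the header off `dataset` in place (the equivalence is about the return value).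

-- ===== PORT A =====
-- zip(*rows): the list of columns, truncated at the shortest row (Python zip semantics)
def pyZipStar (rows : List (List String)) : List (List String) :=
  match rows with
  | [] => []
  | r :: rs =>
    if (r :: rs).any (fun c => c.isEmpty) then []
    else ((r :: rs).map List.headI) :: pyZipStar ((r :: rs).map List.tail)
termination_by rows.headI.length
decreasing_by
  simp only [List.any_eq_true, not_exists] at *
  cases r with
  | nil => simp at *
  | cons x xs => simp

-- the `for i, col in enumerate(zip(*dataset))` loop, with its two accumulators
def loopA (attridx i : Nat) (cols : List (List String)) (target : List String)
    (trdata : List (List String)) : List String × List (List String) :=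
  match cols with
  | [] => (target, trdata)
  | c :: cs =>
    if i = attridx then loopA attridx (i + 1) cs c trdata
    else loopA attridx (i + 1) cs target (trdata ++ [c])

def targetdata (dataset : List (List String)) (attribute_ : String) : List String × List (List String) :=
  match dataset with
  | [] => ([], [])          -- dataset.pop(0) raises IndexError: outside Pre_
  | headers :: rest =>
    match PySem.List.index? headers attribute_ with
    | none => ([], [])      -- headers.index(attribute) raises ValueError: outside Pre_
    | some attridx =>
      let p := loopA attridx 0 (pyZipStar rest) [] []
      (p.1, pyZipStar p.2)

-- ===== PORT B =====
def targetdata_alt (dataset : List (List String)) (attribute_ : String) : List String × List (List String) :=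
  match dataset with
  | [] => ([], [])          -- dataset.pop(0) raises IndexError: outside Pre_
  | headers :: rest =>
    match PySem.List.index? headers attribute_ with
    | none => ([], [])      -- headers.index(attribute) raises ValueError: outside Pre_
    | some attridx =>
      -- row[attridx] raises IndexError on rows shorter than attridx+1: outside Pre_
      (rest.map (fun r => PySem.List.pyGetD r (attridx : Int) ""),
       rest.map (fun r => PySem.List.slice r none (some (attridx : Int)) ++
                          PySem.List.slice r (some ((attridx + 1 : Nat) : Int)) none))

-- ===== PRECONDITION & SPEC =====
-- Pre_ excludes inputs where A raises (empty dataset, attribute missing from the header row) and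
-- ragged tables (a data row whose length differs from the header's), where A's zip truncation
-- silently drops cells — a corner on which B either raises or keeps the full row.
def Pre_targetdata (dataset : List (List String)) (attribute_ : String) : Prop :=
  dataset ≠ [] ∧ attribute_ ∈ dataset.headI ∧
    ∀ r ∈ dataset.tail, r.length = dataset.headI.length
instance (dataset : List (List String)) (attribute_ : String) : Decidable (Pre_targetdata dataset attribute_) := by unfold Pre_targetdata; infer_instance

def pvWitness_targetdata : List (List String) × String := ([["id", "y", "x"], ["1", "a", "p"], ["2", "b", "q"]], "y")

-- On well-formed single-column tables with at least one data row, A's double transpose collapses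
-- the remaining data to (), losing the row count, while B returns one empty row per record,
-- preserving the table shape — the intended value.
def D_targetdata (dataset : List (List String)) (attribute_ : String) : Prop :=
  dataset.tail ≠ [] ∧ dataset.headI.length = 1
instance (dataset : List (List String)) (attribute_ : String) : Decidable (D_targetdata dataset attribute_) := by unfold D_targetdata; infer_instance

def Spec_targetdata (dataset : List (List String)) (attribute_ : String) (out : List String × List (List String)) : Prop := ¬ D_targetdata dataset attribute_ → out = targetdata_alt dataset attribute_
instance (dataset : List (List String)) (attribute_ : String) (out : List String × List (List String)) : Decidable (Spec_targetdata dataset attribute_ out) := by unfold Spec_targetdata; infer_instance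

def pvDiffWitness_targetdata : List (List String) × String := ([["y"], ["a"], ["b"]], "y")
def pvDiffWitnessOut_targetdata : (List String × List (List String)) × (List String × List (List String)) :=
  ((["a", "b"], []), (["a", "b"], [[], []]))

-- ===== CLAIM (what is proved, stated in full; the proofs are below) =====
def Claim_unchanged_targetdata : Prop := ∀ (dataset : List (List String)) (attribute_ : String), Dom_targetdata dataset attribute_ → Pre_targetdata dataset attribute_ → Spec_targetdata dataset attribute_ (targetdata dataset attribute_)
def Claim_changed_targetdata : Prop := Dom_targetdata (pvDiffWitness_targetdata.1) (pvDiffWitness_targetdata.2) ∧ Pre_targetdata (pvDiffWitness_targetdata.1) (pvDiffWitness_targetdata.2) ∧ D_targetdata (pvDiffWitness_targetdata.1) (pvDiffWitness_targetdata.2) ∧ targetdata (pvDiffWitness_targetdata.1) (pvDiffWitness_targetdata.2) = pvDiffWitnessOut_targetdata.1 ∧ targetdata_alt (pvDiffWitness_targetdata.1) (pvDiffWitness_targetdata.2) = pvDiffWitnessOut_targetdata.2 ∧ pvDiffWitnessOut_targetdata.1 ≠ pvDiffWitnessOut_targetdata.2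
def Claim_exact_targetdata : Prop := ∀ (dataset : List (List String)) (attribute_ : String), Dom_targetdata dataset attribute_ → Pre_targetdata dataset attribute_ → D_targetdata dataset attribute_ → targetdata dataset attribute_ ≠ targetdata_alt dataset attribute_

-- ===== LEMMAS AND PROOFS =====

-- m abbreviation used only by the proofs
def mlen (rows : List (List String)) : Nat := ((rows.map List.length).min?).getD 0

lemma mlen_le {rows : List (List String)} {r : List String} (h : r ∈ rows) : mlen rows ≤ r.length := by
  have hmem : r.length ∈ rows.map List.length := List.mem_map_of_mem h
  obtain ⟨m, hm⟩ := Option.isSome_iff_exists.mp (List.isSome_min?_of_mem hmem)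
  have := (List.min?_eq_some_iff.mp hm).2
  simp [mlen, hm, this r.length hmem]

lemma mlen_mem {rows : List (List String)} (hne : rows ≠ []) : ∃ r ∈ rows, r.length = mlen rows := by
  have hne' : rows.map List.length ≠ [] := by simpa using hne
  obtain ⟨m, hm⟩ := Option.isSome_iff_exists.mp (List.isSome_min?_of_ne_nil hne')
  have := List.min?_mem hm
  rw [List.mem_map] at this
  obtain ⟨r, hr, hlen⟩ := this
  exact ⟨r, hr, by simp [mlen, hm, hlen]⟩

lemma mlen_zero {rows : List (List String)} {r : List String} (hr : r ∈ rows) (h : r = []) : mlen rows = 0 := by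
  have := mlen_le hr
  subst h; simpa using this

lemma mlen_const {rows : List (List String)} {n : Nat} (hne : rows ≠ []) (h : ∀ r ∈ rows, r.length = n) : mlen rows = n := by
  obtain ⟨r, hr, hlen⟩ := mlen_mem hne
  rw [← hlen, h r hr]

lemma mlen_pos {rows : List (List String)} (hne : rows ≠ []) (h : ∀ r ∈ rows, r ≠ []) : 0 < mlen rows := by
  obtain ⟨r, hr, hlen⟩ := mlen_mem hne
  have := h r hr
  rw [← hlen]
  exact List.length_pos_iff.mpr this

lemma mlen_tail {rows : List (List String)} (hne : rows ≠ []) (_h : ∀ r ∈ rows, r ≠ []) :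
    mlen (rows.map List.tail) = mlen rows - 1 := by
  have hx : (rows.map List.tail).map List.length = (rows.map List.length).map (· - 1) := by
    simp [List.map_map, Function.comp_def]
  obtain ⟨r, hr, hlen⟩ := mlen_mem hne
  have hsome : ((rows.map List.tail).map List.length).min? = some (mlen rows - 1) := by
    rw [hx]
    rw [List.min?_eq_some_iff]
    constructor
    · exact List.mem_map.mpr ⟨r.length, List.mem_map_of_mem hr, by rw [hlen]⟩
    · intro b hb
      rw [List.mem_map] at hb
      obtain ⟨x, hx', rfl⟩ := hb
      have : mlen rows ≤ x := by
        rw [List.mem_map] at hx'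
        obtain ⟨s, hs, rfl⟩ := hx'
        exact mlen_le hs
      omega
  rw [List.map_map] at hsome
  have := congrArg (fun o => Option.getD o 0) hsome
  simpa [mlen, Function.comp_def] using this

-- characterization of pyZipStar: mlen columns, column j = the j-th entries of the rows
lemma pyZipStar_char (rows : List (List String)) :
    pyZipStar rows = (List.range (mlen rows)).map (fun j => rows.map (fun r => r.getD j "")) := by
  induction rows using pyZipStar.induct with
  | case1 => simp [pyZipStar, mlen]
  | case2 r rs hany =>
    rw [List.any_eq_true] at hany
    obtain ⟨c, hc, hce⟩ := hany
    rw [pyZipStar]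
    simp only [List.any_eq_true]
    rw [if_pos ⟨c, hc, hce⟩, mlen_zero hc (by simpa using hce)]
    simp
  | case3 r rs hany ih =>
    have hall : ∀ s ∈ (r :: rs), s ≠ [] := by
      intro s hs
      by_contra hnil
      exact hany (List.any_eq_true.mpr ⟨s, hs, by simp [hnil]⟩)
    rw [pyZipStar]
    simp only [List.any_eq_true]
    rw [if_neg (by rw [← List.any_eq_true]; exact hany)]
    have hpos : 0 < mlen (r :: rs) := mlen_pos (by simp) hall
    obtain ⟨k, hk⟩ : ∃ k, mlen (r :: rs) = k + 1 := ⟨mlen (r :: rs) - 1, by omega⟩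
    have htail : mlen ((r :: rs).map List.tail) = k := by
      rw [mlen_tail (by simp) hall, hk]
      omega
    rw [ih, htail, hk, List.range_succ_eq_map]
    simp only [List.map_cons, List.map_map]
    congr 1
    · show List.map List.headI (r :: rs) = List.map (fun s => s.getD 0 "") (r :: rs)
      apply List.map_congr_left
      intro s hs
      cases s with
      | nil => exact absurd rfl (hall _ hs)
      | cons a t => simp [List.headI, List.getD]
    · apply List.map_congr_left
      intro j _
      simp only [Function.comp_def]
      show List.map (fun s => s.tail.getD j "") (r :: rs) = List.map (fun s => s.getD j.succ "") (r :: rs)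
      apply List.map_congr_left
      intro s hs
      cases s with
      | nil => exact absurd rfl (hall _ hs)
      | cons a t => simp [List.getD]

-- characterization of loopA
lemma loopA_ge (cols : List (List String)) (a i : Nat) (t : List String) (d : List (List String))
    (h : a < i) : loopA a i cols t d = (t, d ++ cols) := by
  induction cols generalizing i t d with
  | nil => simp [loopA]
  | cons c cs ih =>
    have hne : i ≠ a := by omega
    rw [loopA, if_neg hne, ih _ _ _ (by omega)]
    simp

lemma loopA_char (cols : List (List String)) (a i : Nat) (t : List String) (d : List (List String))
    (h : i ≤ a) :
    loopA a i cols t d =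
      (if a - i < cols.length then cols.getD (a - i) [] else t,
       d ++ cols.take (a - i) ++ cols.drop (a - i + 1)) := by
  induction cols generalizing i t d with
  | nil => simp [loopA]
  | cons c cs ih =>
    by_cases hia : i = a
    · subst hia
      rw [loopA, if_pos rfl, loopA_ge cs i (i+1) c d (by omega)]
      simp
    · have h1 : i + 1 ≤ a := by omega
      have h2 : a - i = (a - (i + 1)) + 1 := by omega
      simp only [loopA, if_neg hia, ih (i+1) t (d ++ [c]) h1, h2]
      simp [List.getD]

lemma drop_range (n k : Nat) : (List.range n).drop k = List.range' k (n - k) := by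
  apply List.ext_getElem
  · simp
  · intro i h1 h2
    simp [List.getElem_drop]

lemma drop_take_map_range' (xs : List String) (k l : Nat) (h : k + l ≤ xs.length) :
    (xs.drop k).take l = (List.range' k l).map (fun j => xs.getD j "") := by
  apply List.ext_getElem
  · simp; omega
  · intro i h1 h2
    have hi : k + i < xs.length := by simp at h1; omega
    simp [List.getElem_take, List.getElem_drop, List.getElem?_eq_getElem hi]

lemma take_map_range (xs : List String) (l : Nat) (h : l ≤ xs.length) :
    xs.take l = (List.range l).map (fun j => xs.getD j "") := by
  have := drop_take_map_range' xs 0 l (by omega)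
  simpa [List.range_eq_range'] using this

-- getD on the mapped range
lemma getD_range_map (m a : Nat) (f : Nat → List String) (h : a < m) :
    ((List.range m).map f).getD a [] = f a := by
  rw [List.getD_eq_getElem _ _ (by simpa using h)]
  simp

-- ===== VERDICT (by name: the statements are the Claim_ definitions above) =====
theorem targetdata_spec : Claim_unchanged_targetdata := by
  intro dataset attribute_ _ hpre
  unfold Spec_targetdata
  intro hnd
  obtain ⟨hne, hmem, hrect⟩ := hpre
  cases dataset with
  | nil => exact absurd rfl hne
  | cons headers rest =>
    simp only [List.headI] at hmem hrect
    simp only [List.tail_cons] at hrect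
    obtain ⟨a, ha⟩ : ∃ a, PySem.List.index? headers attribute_ = some a :=
      Option.isSome_iff_exists.mp ((PySem.List.index?_isSome_iff headers attribute_).mpr hmem)
    obtain ⟨haL, -, -⟩ := PySem.List.getElem_of_index?_eq_some ha
    simp only [targetdata, targetdata_alt, ha]
    simp only [PySem.List.pyGetD_natCast, PySem.List.slice_to_natCast, PySem.List.slice_from_natCast]
    cases rest with
    | nil => simp [pyZipStar, loopA]
    | cons r0 rs =>
      set rest := r0 :: rs with hrdef
      have hrne : rest ≠ [] := by simp [hrdef]
      have hL1 : headers.length ≠ 1 := by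
        simp only [D_targetdata, List.tail_cons, List.headI] at hnd
        intro h1
        exact hnd ⟨by simp [hrdef], h1⟩
      have hm : mlen rest = headers.length := mlen_const hrne hrect
      set m := headers.length with hmL
      have hmle : ∀ r ∈ rest, m ≤ r.length := fun r hr => (hrect r hr).ge
      have hcols := pyZipStar_char rest
      have hcolslen : (pyZipStar rest).length = m := by rw [hcols]; simp [hm]
      rw [loopA_char _ a 0 [] [] (by omega)]
      simp only [Nat.sub_zero, List.nil_append]
      rw [if_pos (by rw [hcolslen]; exact haL)]
      have htgt : (pyZipStar rest).getD a [] = rest.map (fun r => r.getD a "") := by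
        rw [hcols, hm, getD_range_map _ _ _ haL]
      refine Prod.ext (by simpa using htgt) ?_
      -- data: the remaining columns, re-transposed
      have htr : (pyZipStar rest).take a ++ (pyZipStar rest).drop (a + 1) =
          ((List.range a ++ List.range' (a + 1) (m - (a + 1))).map
            (fun j => rest.map (fun r => r.getD j ""))) := by
        rw [hcols, hm, ← List.map_take, ← List.map_drop, ← List.map_append]
        congr 1
        rw [List.take_range, drop_range, Nat.min_eq_left (by omega)]
      rw [htr]
      set js := List.range a ++ List.range' (a + 1) (m - (a + 1)) with hjs
      have hjsne : js.map (fun j => rest.map (fun r => r.getD j "")) ≠ [] := by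
        simp only [ne_eq, List.map_eq_nil_iff, hjs, List.append_eq_nil_iff, List.range_eq_nil,
          List.range'_eq_nil_iff]
        omega
      set n := rest.length with hn
      have hconst : ∀ c ∈ js.map (fun j => rest.map (fun r => r.getD j "")), c.length = n := by
        intro c hc
        rw [List.mem_map] at hc
        obtain ⟨j, _, rfl⟩ := hc
        simp [hn]
      dsimp only
      rw [pyZipStar_char (js.map (fun j => rest.map (fun r => r.getD j ""))), mlen_const hjsne hconst]
      apply List.ext_getElem (by simp [hn])
      intro i h1 h2
      have hin : i < rest.length := by simpa using h2
      simp only [List.getElem_map, List.map_map, List.getElem_range, Function.comp_def]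
      have hleni : rest[i].length = m := hrect _ (List.getElem_mem _)
      have hdropfull : rest[i].drop (a + 1) = (rest[i].drop (a + 1)).take (m - (a + 1)) := by
        rw [List.take_of_length_le (by rw [List.length_drop, hleni])]
      rw [hdropfull, take_map_range rest[i] a (by omega),
          drop_take_map_range' rest[i] (a + 1) (m - (a + 1)) (by omega),
          ← List.map_append]
      apply List.map_congr_left
      intro j hj
      rw [List.getD_eq_getElem _ _ (by simpa using hin)]
      simp

theorem targetdata_changed : Claim_changed_targetdata := by
  unfold Claim_changed_targetdata
  refine ⟨by decide, by decide, by decide, ?_, by decide, by decide⟩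
  show targetdata [["y"], ["a"], ["b"]] "y" = (["a", "b"], [])
  have h1 : PySem.List.index? ["y"] "y" = some 0 := by decide
  have hz1 : pyZipStar [["a"], ["b"]] = [["a", "b"]] := by rw [pyZipStar_char]; decide
  have hz2 : pyZipStar ([] : List (List String)) = [] := by rw [pyZipStar_char]; decide
  simp only [targetdata, h1, hz1, loopA]
  norm_num [hz2, loopA]

theorem targetdata_tight : Claim_exact_targetdata := by
  intro dataset attribute_ _ hpre hd
  obtain ⟨hne, hmem, hrect⟩ := hpre
  obtain ⟨htne, hL1⟩ := hd
  cases dataset with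
  | nil => exact absurd rfl hne
  | cons headers rest =>
    simp only [List.headI] at hmem hrect hL1
    simp only [List.tail_cons] at hrect htne
    obtain ⟨a, ha⟩ : ∃ a, PySem.List.index? headers attribute_ = some a :=
      Option.isSome_iff_exists.mp ((PySem.List.index?_isSome_iff headers attribute_).mpr hmem)
    obtain ⟨haL, -, -⟩ := PySem.List.getElem_of_index?_eq_some ha
    have ha0 : a = 0 := by omega
    simp only [targetdata, targetdata_alt, ha]
    intro heq
    have h2 := congrArg Prod.snd heq
    simp only at h2
    -- A's data part is []
    have hm : mlen rest = 1 := by rw [mlen_const htne hrect, hL1]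
    have hcolslen : (pyZipStar rest).length = 1 := by rw [pyZipStar_char rest, hm]; simp
    rw [loopA_char _ a 0 [] [] (by omega), ha0] at h2
    simp only [Nat.sub_zero, List.nil_append, List.take_zero] at h2
    rw [List.drop_eq_nil_of_le (by omega)] at h2
    -- B's data part is a nonempty map
    have : (0 : Nat) = rest.length := by
      have := congrArg List.length h2
      simpa [pyZipStar] using this
    exact htne (List.eq_nil_of_length_eq_zero this.symm)
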